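-- pv_equiv track=rewrite | github.com/kylelee529/Diagonal-Transposition-Cipher- | diagonal_transposition_cipher.py | create_matrix_top_to_bottom
-- ===== SOURCE A (Python) =====
-- def create_matrix_top_to_bottom(message, cols):
--     """ Create a matrix with the message written top to bottom in columns. """
--     rows = (len(message) + cols - 1) // cols  # Ceiling division to get the number of rows
--     matrix = [['' for _ in range(cols)] for _ in range(rows)]
--
--     idx = 0
--     for col in range(cols):
--         for row in range(rows):
--             if idx < len(message):
--                 matrix[row][col] = message[idx]
--                 idx += 1
--             else:
--                 matrix[row][col] = ''
--
--     return matrix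
-- ===== SOURCE B (Python) =====
-- def create_matrix_top_to_bottom(message, cols):
--     """ Create a matrix with the message written top to bottom in columns. """
--     rows = (len(message) + cols - 1) // cols  # Ceiling division to get the number of rows
--     # slice the message into column chunks, pad each to exactly `rows` cells
--     columns = [list(message[c * rows:(c + 1) * rows]) + [''] * (rows - len(message[c * rows:(c + 1) * rows]))
--                for c in range(cols)]
--     # transpose: row r collects cell r of every column
--     return [[col[r] for col in columns] for r in range(rows)]
-- ===== Notes on version B (the rewrite author's own statement) =====
-- stated objective: alternative
-- what changed: Replaces the mutable matrix with a per-cell idx counter and in-range guard by a slice-then-transpose structure: the message is cut into column chunks of length rows, each padded with '' to rows cells, and the matrix is produced by transposing the chunk list.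
import Mathlib
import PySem

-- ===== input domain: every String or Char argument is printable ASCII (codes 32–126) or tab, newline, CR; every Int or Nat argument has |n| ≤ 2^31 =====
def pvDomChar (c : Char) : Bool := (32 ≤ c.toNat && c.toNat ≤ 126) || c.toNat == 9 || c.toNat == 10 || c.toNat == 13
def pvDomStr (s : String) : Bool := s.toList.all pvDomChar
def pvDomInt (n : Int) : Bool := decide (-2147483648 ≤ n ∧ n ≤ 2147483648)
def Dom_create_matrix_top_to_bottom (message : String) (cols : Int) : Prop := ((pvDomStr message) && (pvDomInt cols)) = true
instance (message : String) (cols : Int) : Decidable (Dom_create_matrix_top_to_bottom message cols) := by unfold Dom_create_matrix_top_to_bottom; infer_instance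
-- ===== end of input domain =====

-- B rebuilds the matrix by slicing the message into padded column chunks and transposing them,
-- instead of A's per-cell idx counter with an in-range guard (objective: alternative decomposition).

-- ===== PORT A =====
-- inner `for row in range(rows)` loop of A, one column
def pvInnerA (chars : List Char) (n R : Nat) (st : List (List String) × Nat) (col : Nat) :
    List (List String) × Nat :=
  (List.range R).foldl (fun st2 row =>
    if st2.2 < n then
      (st2.1.set row ((st2.1.getD row []).set col (String.mk [chars.getD st2.2 ' '])), st2.2 + 1)
    else
      (st2.1.set row ((st2.1.getD row []).set col ""), st2.2)) st

def create_matrix_top_to_bottom (message : String) (cols : Int) : List (List String) :=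
  let chars := message.toList
  let n := chars.length
  let rows := (PySem.Int.floordiv ((n : Int) + cols - 1) cols).toNat
  let colsN := cols.toNat
  let matrix0 := (List.range rows).map (fun _ => (List.range colsN).map (fun _ => ("" : String)))
  ((List.range colsN).foldl (pvInnerA chars n rows) (matrix0, 0)).1

-- ===== PORT B =====
-- one column chunk of B: message[c*rows:(c+1)*rows] padded with '' to exactly `rows` cells
def pvColB (chars : List Char) (R : Nat) (c : Nat) : List String :=
  let chunk := (PySem.List.slice chars (some ((c * R : Nat) : Int))
      (some (((c + 1) * R : Nat) : Int))).map (fun ch => String.mk [ch])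
  chunk ++ List.replicate (R - chunk.length) ""

def create_matrix_top_to_bottom_alt (message : String) (cols : Int) : List (List String) :=
  let chars := message.toList
  let rows := (PySem.Int.floordiv ((chars.length : Int) + cols - 1) cols).toNat
  let columns := (List.range cols.toNat).map (pvColB chars rows)
  (List.range rows).map (fun r => columns.map (fun col => col.getD r ""))

-- ===== PRECONDITION & SPEC =====
-- Pre_ excludes exactly cols = 0, where A raises ZeroDivisionError on the ceiling division.
def Pre_create_matrix_top_to_bottom (message : String) (cols : Int) : Prop := cols ≠ 0
instance (message : String) (cols : Int) : Decidable (Pre_create_matrix_top_to_bottom message cols) := by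
  unfold Pre_create_matrix_top_to_bottom; infer_instance

def pvWitness_create_matrix_top_to_bottom : String × Int := ("hello", 3)

def Spec_create_matrix_top_to_bottom (message : String) (cols : Int) (out : List (List String)) : Prop := out = create_matrix_top_to_bottom_alt message cols
instance (message : String) (cols : Int) (out : List (List String)) : Decidable (Spec_create_matrix_top_to_bottom message cols out) := by unfold Spec_create_matrix_top_to_bottom; infer_instance

-- ===== CLAIM (what is proved, stated in full; the proofs are below) =====
def Claim_equal_create_matrix_top_to_bottom : Prop := ∀ (message : String) (cols : Int), Dom_create_matrix_top_to_bottom message cols → Pre_create_matrix_top_to_bottom message cols → Spec_create_matrix_top_to_bottom message cols (create_matrix_top_to_bottom message cols)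

-- ===== LEMMAS AND PROOFS =====

-- the intended content of cell (r, c)
def pvCell (chars : List Char) (R r c : Nat) : String :=
  if c * R + r < chars.length then String.mk [chars.getD (c * R + r) ' '] else ""

-- an R × C matrix given by a cell function
def pvMk (R C : Nat) (f : Nat → Nat → String) : List (List String) :=
  (List.range R).map (fun r => (List.range C).map (fun c => f r c))

-- partially filled matrix: columns < k complete, column k filled down to row < j
def pvG (chars : List Char) (R k j : Nat) : Nat → Nat → String :=
  fun r c => if c < k ∨ (c = k ∧ r < j) then pvCell chars R r c else ""

lemma pvMk_congr {R C : Nat} {f g : Nat → Nat → String}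
    (h : ∀ r < R, ∀ c < C, f r c = g r c) : pvMk R C f = pvMk R C g := by
  unfold pvMk
  refine List.map_congr_left (fun r hr => ?_)
  refine List.map_congr_left (fun c hc => ?_)
  exact h r (List.mem_range.mp hr) c (List.mem_range.mp hc)

lemma pvMk_getD {R C : Nat} {f : Nat → Nat → String} {j : Nat} (hj : j < R) :
    (pvMk R C f).getD j [] = (List.range C).map (f j) := by
  unfold pvMk
  rw [List.getD_eq_getElem _ _ (by simpa using hj)]
  simp

lemma pvMk_set {R C : Nat} {f : Nat → Nat → String} {j k : Nat} (hj : j < R) (_hk : k < C)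
    (v : String) :
    (pvMk R C f).set j (((pvMk R C f).getD j []).set k v)
      = pvMk R C (fun r c => if r = j ∧ c = k then v else f r c) := by
  rw [pvMk_getD hj]
  unfold pvMk
  apply List.ext_getElem
  · simp
  · intro i h1 h2
    simp only [List.length_set, List.length_map, List.length_range] at h1
    rw [List.getElem_set]
    simp only [List.getElem_map, List.getElem_range]
    by_cases hij : j = i
    · subst hij
      rw [if_pos rfl]
      apply List.ext_getElem
      · simp
      · intro m hm1 hm2
        rw [List.getElem_set]
        simp only [List.getElem_map, List.getElem_range]
        by_cases hmk : k = m
        · subst hmk; simp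
        · rw [if_neg hmk]; simp [Ne.symm hmk]
    · rw [if_neg hij]
      apply List.map_congr_left
      intro c hc
      simp [Ne.symm hij]

-- one inner loop (column k) advances the invariant across all R rows
lemma pvInnerA_invariant (chars : List Char) (R C k : Nat) (hk : k < C) :
    pvInnerA chars chars.length R (pvMk R C (pvG chars R k 0), min (k * R) chars.length) k
      = (pvMk R C (pvG chars R k R), min (k * R + R) chars.length) := by
  unfold pvInnerA
  suffices h : ∀ j ≤ R,
      (List.range j).foldl (fun st2 row =>
        if st2.2 < chars.length then
          (st2.1.set row ((st2.1.getD row []).set k (String.mk [chars.getD st2.2 ' '])), st2.2 + 1)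
        else
          (st2.1.set row ((st2.1.getD row []).set k ""), st2.2))
        (pvMk R C (pvG chars R k 0), min (k * R) chars.length)
      = (pvMk R C (pvG chars R k j), min (k * R + j) chars.length) by
    simpa using h R le_rfl
  intro j hj
  induction j with
  | zero => simp
  | succ j ih =>
    have hjR : j < R := by omega
    rw [List.range_succ, List.foldl_append, ih (by omega)]
    simp only [List.foldl_cons, List.foldl_nil]
    by_cases hidx : min (k * R + j) chars.length < chars.length
    · have hlt : k * R + j < chars.length := by omega
      have hmin : min (k * R + j) chars.length = k * R + j := by omega
      rw [if_pos hidx, pvMk_set hjR hk]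
      simp only [Prod.mk.injEq]
      refine ⟨?_, by omega⟩
      apply pvMk_congr
      intro r hr c hc
      by_cases hr1 : r = j ∧ c = k
      · obtain ⟨h1, h2⟩ := hr1; subst h1; subst h2
        rw [if_pos ⟨rfl, rfl⟩]
        unfold pvG
        rw [if_pos (Or.inr ⟨rfl, Nat.lt_succ_self _⟩)]
        unfold pvCell
        rw [hmin, if_pos hlt]
      · rw [if_neg hr1]
        unfold pvG
        exact if_congr (by omega) rfl rfl
    · have hge : chars.length ≤ k * R + j := by omega
      rw [if_neg hidx, pvMk_set hjR hk]
      simp only [Prod.mk.injEq]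
      refine ⟨?_, by omega⟩
      apply pvMk_congr
      intro r hr c hc
      by_cases hr1 : r = j ∧ c = k
      · obtain ⟨h1, h2⟩ := hr1; subst h1; subst h2
        rw [if_pos ⟨rfl, rfl⟩]
        unfold pvG
        rw [if_pos (Or.inr ⟨rfl, Nat.lt_succ_self _⟩)]
        unfold pvCell
        rw [if_neg (by omega)]
      · rw [if_neg hr1]
        unfold pvG
        exact if_congr (by omega) rfl rfl

-- the outer loop fills the first C columns
lemma pvOuterA (chars : List Char) (R C : Nat) :
    (List.range C).foldl (pvInnerA chars chars.length R)
        (pvMk R C (pvG chars R 0 0), 0)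
      = (pvMk R C (pvG chars R C 0), min (C * R) chars.length) := by
  suffices h : ∀ k ≤ C,
      (List.range k).foldl (pvInnerA chars chars.length R)
        (pvMk R C (pvG chars R 0 0), 0)
      = (pvMk R C (pvG chars R k 0), min (k * R) chars.length) by
    simpa using h C le_rfl
  intro k hk
  induction k with
  | zero => simp
  | succ k ih =>
    rw [List.range_succ, List.foldl_append, ih (by omega)]
    simp only [List.foldl_cons, List.foldl_nil]
    rw [pvInnerA_invariant chars R C k (by omega)]
    simp only [Prod.mk.injEq]
    refine ⟨?_, ?_⟩
    · apply pvMk_congr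
      intro r hr c hc
      unfold pvG
      exact if_congr (by omega) rfl rfl
    · have h1 : (k + 1) * R = k * R + R := by ring
      omega

-- B's padded column chunk reads back exactly the intended cells
lemma pvColB_getD (chars : List Char) (R r c : Nat) (hr : r < R) :
    (pvColB chars R c).getD r "" = pvCell chars R r c := by
  unfold pvColB
  have hcast : (((c + 1) * R : Nat) : Int) = ((c * R : Nat) : Int) + ((R : Nat) : Int) := by
    push_cast; ring
  rw [hcast, PySem.List.slice_natCast_add]
  simp only []
  set chunk := ((chars.drop (c * R)).take R).map (fun ch => String.mk [ch]) with hchunk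
  have hlen : chunk.length = min R (chars.length - c * R) := by
    simp [hchunk]
  by_cases hin : r < chunk.length
  · rw [List.getD_append _ _ _ _ hin, List.getD_eq_getElem _ _ hin]
    have hr2 : r < ((chars.drop (c * R)).take R).length := by
      simpa [hchunk] using hin
    have hidx : c * R + r < chars.length := by
      simp only [List.length_take, List.length_drop] at hr2; omega
    simp only [hchunk, List.getElem_map, List.getElem_take, List.getElem_drop]
    unfold pvCell
    rw [if_pos hidx, List.getD_eq_getElem _ _ hidx]
  · have hout : chars.length ≤ c * R + r := by omega
    rw [List.getD_append_right _ _ _ _ (by omega)]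
    unfold pvCell
    rw [if_neg (show ¬ c * R + r < chars.length by omega)]
    rcases Nat.lt_or_ge (r - chunk.length) (List.replicate (R - chunk.length) "").length with h | h
    · rw [List.getD_eq_getElem _ _ h, List.getElem_replicate]
    · rw [List.getD_eq_default _ _ h]

lemma pvB_eq_mk (chars : List Char) (R C : Nat) :
    (List.range R).map (fun r => ((List.range C).map (pvColB chars R)).map (fun col => col.getD r ""))
      = pvMk R C (fun r c => pvCell chars R r c) := by
  unfold pvMk
  refine List.map_congr_left (fun r hr => ?_)
  rw [List.map_map]
  exact List.map_congr_left (fun c _ => pvColB_getD chars R r c (List.mem_range.mp hr))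

-- ===== VERDICT (by name: the statement is the Claim_ definition above) =====
theorem create_matrix_top_to_bottom_spec : Claim_equal_create_matrix_top_to_bottom := by
  intro message cols _ _
  unfold Spec_create_matrix_top_to_bottom create_matrix_top_to_bottom create_matrix_top_to_bottom_alt
  dsimp only
  set chars := message.toList
  set R := (PySem.Int.floordiv ((chars.length : Int) + cols - 1) cols).toNat
  set C := cols.toNat
  have hinit : (List.range R).map (fun _ => (List.range C).map (fun _ => ("" : String)))
      = pvMk R C (pvG chars R 0 0) := by
    unfold pvMk pvG; simp
  rw [hinit, pvOuterA chars R C, pvB_eq_mk chars R C]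
  apply pvMk_congr
  intro r hr c hc
  unfold pvG
  simp [hc]
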